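-- pv_equiv track=rewrite | github.com/dk538/IIA-labs | 3F7/3F7py/adaptive/txtin.py | context_freq
-- ===== SOURCE A (Python) =====
-- def context_freq(seq, k):
--
--     freqs = {}
--
--     new_seq = seq
--
--     for i in range(len(new_seq)):
--
--         if i < k:
--             context = str(new_seq[:i])
--
--         else:
--             context = str(new_seq[i-k:i])
--
--         if context not in freqs.keys():
--             freqs[context] = {}
--
--         if int(new_seq[i]) not in freqs[context].keys():
--             freqs[context][int(new_seq[i])] = 0
--
--         freqs[context][int(new_seq[i])] += 1
--
--     return freqs
-- ===== SOURCE B (Python) =====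
-- def context_freq(seq, k):
--     # One pass with a sliding window maintained incrementally (append + pop(0))
--     # instead of re-slicing seq at every index.
--     freqs = {}
--     window = []
--     for x in seq:
--         d = freqs.setdefault(str(window), {})
--         xi = int(x)
--         d[xi] = d.get(xi, 0) + 1
--         window.append(x)
--         if len(window) > k:
--             window.pop(0)
--     return freqs
-- ===== Notes on version B (the rewrite author's own statement) =====
-- stated objective: simpler
-- what changed: B replaces per-index re-slicing of seq (seq[:i] / seq[i-k:i]) with a sliding window list maintained incrementally (append + pop(0)), and replaces the nested membership-check/initialise/increment dance with setdefault and dict.get.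
import Mathlib
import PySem

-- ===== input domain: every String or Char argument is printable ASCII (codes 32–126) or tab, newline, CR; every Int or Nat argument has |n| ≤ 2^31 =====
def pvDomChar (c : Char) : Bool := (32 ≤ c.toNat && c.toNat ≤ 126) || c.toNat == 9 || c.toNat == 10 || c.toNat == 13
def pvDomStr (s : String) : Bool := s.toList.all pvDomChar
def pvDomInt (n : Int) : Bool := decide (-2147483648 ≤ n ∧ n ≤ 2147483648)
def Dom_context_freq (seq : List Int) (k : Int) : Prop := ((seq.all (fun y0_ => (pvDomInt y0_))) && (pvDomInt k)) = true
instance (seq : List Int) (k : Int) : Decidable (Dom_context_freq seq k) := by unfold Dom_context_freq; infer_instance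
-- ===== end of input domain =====

-- B maintains the context as a sliding-window list updated incrementally (append + pop(0)) instead of
-- re-slicing seq at each index, and uses setdefault/get instead of nested membership checks; simpler, same result.

-- shared helper: Python's str(list_of_ints), e.g. "[1, 2]" (ported by hand, exact for int lists)
def pvFmt (xs : List Int) : String :=
  "[" ++ PySem.Str.join ", " (xs.map PySem.Int.toStr) ++ "]"

-- ===== PORT A =====
-- one iteration of A's loop body at index i (the freqs-update part)
def pvStepA (freqs : PySem.Dict String (PySem.Dict Int Int)) (context : String) (x : Int) :
    PySem.Dict String (PySem.Dict Int Int) :=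
  -- if context not in freqs.keys(): freqs[context] = {}
  let freqs := if freqs.contains context then freqs else freqs.insert context PySem.Dict.empty
  let inner := (freqs.get? context).getD PySem.Dict.empty
  -- if int(x) not in freqs[context].keys(): freqs[context][int(x)] = 0
  let inner := if inner.contains x then inner else inner.insert x 0
  -- freqs[context][int(x)] += 1
  freqs.insert context (inner.modify x 0 (· + 1))

def context_freq (seq : List Int) (k : Int) : List (String × List (Int × Int)) :=
  let freqs := (PySem.List.pyRange 0 (seq.length : Int) 1).foldl
    (fun freqs i =>
      let context := if i < k then pvFmt (PySem.List.slice seq none (some i))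
                     else pvFmt (PySem.List.slice seq (some (i - k)) (some i))
      pvStepA freqs context (PySem.List.pyGetD seq i 0))
    PySem.Dict.empty
  freqs.items.map (fun p => (p.1, p.2.items))

-- ===== PORT B =====
-- one iteration of B's loop body: state = (freqs, window)
def pvStepB (k : Int) (st : PySem.Dict String (PySem.Dict Int Int) × List Int) (x : Int) :
    PySem.Dict String (PySem.Dict Int Int) × List Int :=
  let c := pvFmt st.2
  -- d = freqs.setdefault(str(window), {})
  let freqs := st.1.setdefault c PySem.Dict.empty
  let d := (freqs.get? c).getD PySem.Dict.empty
  -- d[xi] = d.get(xi, 0) + 1   (mutates the aliased dict inside freqs)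
  let freqs := freqs.insert c (d.insert x (d.getD x 0 + 1))
  -- window.append(x); if len(window) > k: window.pop(0)
  let w := st.2 ++ [x]
  (freqs, if k < (w.length : Int) then w.tail else w)

def context_freq_alt (seq : List Int) (k : Int) : List (String × List (Int × Int)) :=
  let st := seq.foldl (pvStepB k) (PySem.Dict.empty, [])
  st.1.items.map (fun p => (p.1, p.2.items))

-- ===== PRECONDITION & SPEC =====
def Spec_context_freq (seq : List Int) (k : Int) (out : List (String × List (Int × Int))) : Prop := out = context_freq_alt seq k
instance (seq : List Int) (k : Int) (out : List (String × List (Int × Int))) : Decidable (Spec_context_freq seq k out) := by unfold Spec_context_freq; infer_instance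

-- ===== CLAIM (what is proved, stated in full; the proofs are below) =====
def Claim_equal_context_freq : Prop := ∀ (seq : List Int) (k : Int), Dom_context_freq seq k → Spec_context_freq seq k (context_freq seq k)

-- ===== LEMMAS AND PROOFS =====

-- B's window after processing the prefix `pre`
def pvWin (k : Int) (pre : List Int) : List Int :=
  if k ≤ 0 then [] else pre.drop (pre.length - k.toNat)

lemma pvWin_nil (k : Int) : pvWin k [] = [] := by
  simp [pvWin]

-- (I1) the incremental window update preserves pvWin
lemma pvWin_step (k : Int) (pre : List Int) (x : Int) :
    (let w := pvWin k pre ++ [x]; if k < (w.length : Int) then w.tail else w)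
      = pvWin k (pre ++ [x]) := by
  by_cases hk : k ≤ 0
  · simp [pvWin, hk]
    omega
  · push_neg at hk
    have hk0 : 0 < k.toNat := by omega
    simp only [pvWin, if_neg (by omega : ¬ k ≤ 0)]
    by_cases hle : k.toNat ≤ pre.length
    · have hlen : ((pre.drop (pre.length - k.toNat) ++ [x]).length : Int) = k.toNat + 1 := by
        simp [List.length_drop]; omega
      rw [if_pos (by rw [hlen]; exact_mod_cast by omega)]
      have hne : pre.drop (pre.length - k.toNat) ≠ [] := by
        intro h
        have := congrArg List.length h
        simp [List.length_drop] at this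
        omega
      have hlen2 : (pre ++ [x]).length = pre.length + 1 := by simp
      rw [List.tail_append_of_ne_nil hne, List.tail_drop, hlen2,
        List.drop_append_of_le_length (by omega)]
      congr 2
      omega
    · push_neg at hle
      have h1 : pre.length - k.toNat = 0 := by omega
      have h2 : (pre ++ [x]).length - k.toNat = 0 := by simp; omega
      rw [h1, h2, List.drop_zero, List.drop_zero, if_neg]
      have : (pre ++ [x]).length = pre.length + 1 := by simp
      rw [this]
      push_cast
      omega

-- (I2) A's context at index |pre| in seq = pre ++ rest is B's window
lemma pvContext_eq (k : Int) (pre rest : List Int) :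
    (if (pre.length : Int) < k
      then PySem.List.slice (pre ++ rest) none (some (pre.length : Int))
      else PySem.List.slice (pre ++ rest) (some ((pre.length : Int) - k)) (some (pre.length : Int)))
      = pvWin k pre := by
  by_cases hlt : (pre.length : Int) < k
  · rw [if_pos hlt, PySem.List.slice_to_natCast]
    have : pre.length - k.toNat = 0 := by omega
    simp [pvWin, if_neg (by omega : ¬ k ≤ 0), this]
  · push_neg at hlt
    rw [if_neg (by omega)]
    rw [PySem.List.slice_toNat _ (by omega) (by omega)]
    by_cases hk : k ≤ 0
    · have h0 : ((pre.length : Int)).toNat - ((pre.length : Int) - k).toNat = 0 := by omega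
      rw [h0]
      simp [pvWin, hk]
    · push_neg at hk
      have hb : ((pre.length : Int)).toNat - ((pre.length : Int) - k).toNat = k.toNat := by omega
      have ha : ((pre.length : Int) - k).toNat = pre.length - k.toNat := by omega
      rw [hb, ha, List.drop_append_of_le_length (by omega)]
      have hlendrop : (pre.drop (pre.length - k.toNat)).length = k.toNat := by
        simp [List.length_drop]; omega
      rw [List.take_append_of_le_length (by omega), pvWin, if_neg (by omega)]
      exact List.take_of_length_le (by omega)

-- (I3) the two freqs updates agree (A's membership-check dance = B's setdefault/get/insert)
lemma pvStep_freqs_eq (f : PySem.Dict String (PySem.Dict Int Int)) (c : String) (x : Int) :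
    pvStepA f c x
      = (let freqs := f.setdefault c PySem.Dict.empty
         let d := (freqs.get? c).getD PySem.Dict.empty
         freqs.insert c (d.insert x (d.getD x 0 + 1))) := by
  have inner_eq : ∀ (d : PySem.Dict Int Int),
      (if d.contains x then d else d.insert x 0).modify x 0 (· + 1)
        = d.insert x (d.getD x 0 + 1) := by
    intro d
    by_cases hc : d.contains x
    · simp only [if_pos hc, PySem.Dict.modify]
    · have hc' : d.contains x = false := by simpa using hc
      simp only [if_neg hc, PySem.Dict.modify, PySem.Dict.getD_insert_self,
        PySem.Dict.insert_insert_self, PySem.Dict.getD_of_not_contains _ _ hc']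
  by_cases h : f.contains c
  · simp only [pvStepA, if_pos h, PySem.Dict.setdefault_of_contains _ _ h, inner_eq,
      PySem.Dict.getD_eq_get?_getD]
  · simp only [pvStepA, if_neg h, PySem.Dict.setdefault_of_not_contains _ _ (by simpa using h),
      inner_eq, PySem.Dict.getD_eq_get?_getD]

-- main loop correspondence
lemma pvLoop_eq (k : Int) (seq : List Int) :
    ∀ (rest pre : List Int) (f : PySem.Dict String (PySem.Dict Int Int)),
      seq = pre ++ rest →
      rest.foldl (pvStepB k) (f, pvWin k pre)
        = ((PySem.List.pyRange (pre.length : Int) (seq.length : Int) 1).foldl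
            (fun freqs i =>
              let context := if i < k then pvFmt (PySem.List.slice seq none (some i))
                             else pvFmt (PySem.List.slice seq (some (i - k)) (some i))
              pvStepA freqs context (PySem.List.pyGetD seq i 0)) f,
           pvWin k seq) := by
  intro rest
  induction rest with
  | nil =>
    intro pre f hseq
    subst hseq
    rw [PySem.List.pyRange_one_eq_nil (by simp)]
    simp
  | cons x rest ih =>
    intro pre f hseq
    have hlen : (pre.length : Int) < (seq.length : Int) := by
      subst hseq; simp
    rw [PySem.List.pyRange_one_cons hlen]
    simp only [List.foldl_cons]
    have hget : PySem.List.pyGetD seq (pre.length : Int) 0 = x := by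
      subst hseq
      rw [PySem.List.pyGetD_natCast]
      simp [List.getD_append_right, List.getD]
    have hctx : (if (pre.length : Int) < k
        then pvFmt (PySem.List.slice seq none (some (pre.length : Int)))
        else pvFmt (PySem.List.slice seq (some ((pre.length : Int) - k)) (some (pre.length : Int))))
        = pvFmt (pvWin k pre) := by
      subst hseq
      rw [← pvContext_eq k pre (x :: rest), apply_ite pvFmt]
    have hstep : pvStepB k (f, pvWin k pre) x
        = (pvStepA f (pvFmt (pvWin k pre)) x, pvWin k (pre ++ [x])) := by
      simp only [pvStepB, pvStep_freqs_eq, ← pvWin_step]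
    rw [hstep, hget, hctx]
    have := ih (pre ++ [x])
      (pvStepA f (pvFmt (pvWin k pre)) x) (by simp [hseq])
    simpa using this

-- ===== VERDICT (by name: the statement is the Claim_ definition above) =====
theorem context_freq_spec : Claim_equal_context_freq := by
  intro seq k _
  unfold Spec_context_freq context_freq context_freq_alt
  have h := pvLoop_eq k seq seq [] PySem.Dict.empty (by simp)
  rw [pvWin_nil] at h
  simp only [List.length_nil, Nat.cast_zero] at h
  rw [h]
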